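-- pv_equiv track=rewrite | github.com/Victory-Hugo/18-phylogenetic | 2-Rho/1-从fasta-弃用/Python：查找、提取表格中下游单倍群的ID.py | find_downstream_haplogroups
-- ===== SOURCE A (Python) =====
-- def find_downstream_haplogroups(haplogroup_name, haplogroups):
--     downstream_haplogroups = []
--     found = False
--     base_level = None
--
--     for level, haplogroup in haplogroups:
--         if haplogroup == haplogroup_name:
--             found = True
--             base_level = level
--             downstream_haplogroups.append(haplogroup)
--         elif found and level > base_level:
--             downstream_haplogroups.append(haplogroup)
--         elif found and level <= base_level:
--             break
--
--     return downstream_haplogroups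
-- ===== SOURCE B (Python) =====
-- def find_downstream_haplogroups(haplogroup_name, haplogroups):
--     levels = [lv for lv, _ in haplogroups]
--     names = [hg for _, hg in haplogroups]
--     if haplogroup_name not in names:
--         return []
--     i = names.index(haplogroup_name)
--     base = levels[i]
--     j = next((k for k in range(i + 1, len(names)) if levels[k] <= base), len(names))
--     return names[i:j]
-- ===== Notes on version B (the rewrite author's own statement) =====
-- stated objective: idiomatic
-- what changed: Replaces A's single flag-and-break stateful loop with unzip + index lookup of the named node, a next() search for the first subsequent level <= base, and one list slice.
-- outside the precondition, e.g. on find_downstream_haplogroups('X', [(1, 'X'), (2, 'A'), (1, 'X')]): A returns ['X', 'A', 'X'], B returns ['X', 'A']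
import Mathlib
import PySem

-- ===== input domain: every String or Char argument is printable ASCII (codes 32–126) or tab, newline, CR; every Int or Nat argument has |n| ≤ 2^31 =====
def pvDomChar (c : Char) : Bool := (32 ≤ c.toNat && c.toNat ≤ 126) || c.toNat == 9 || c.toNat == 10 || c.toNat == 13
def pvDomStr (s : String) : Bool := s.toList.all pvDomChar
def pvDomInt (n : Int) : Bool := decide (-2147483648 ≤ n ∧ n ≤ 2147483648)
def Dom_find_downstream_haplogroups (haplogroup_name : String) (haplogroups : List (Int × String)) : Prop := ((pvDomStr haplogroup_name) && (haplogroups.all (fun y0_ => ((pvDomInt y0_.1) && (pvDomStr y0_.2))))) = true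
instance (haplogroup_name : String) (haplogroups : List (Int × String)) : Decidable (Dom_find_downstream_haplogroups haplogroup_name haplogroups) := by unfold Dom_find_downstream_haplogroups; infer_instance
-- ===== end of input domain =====

-- B replaces A's flag-and-break loop with unzip + index + next() + slice (idiomatic decomposition; same cost).

-- ===== PORT A =====
-- the for-loop with its flag/base_level/accumulator state (base_level None modelled as 0: it is never compared before `found`)
def fdhA_loop (haplogroup_name : String) : List (Int × String) → List String → Bool → Int → List String
  | [], acc, _, _ => acc
  | (level, hg) :: rest, acc, found, base =>
    if hg = haplogroup_name then
      fdhA_loop haplogroup_name rest (acc ++ [hg]) true level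
    else if found && decide (level > base) then
      fdhA_loop haplogroup_name rest (acc ++ [hg]) found base
    else if found && decide (level ≤ base) then
      acc
    else
      fdhA_loop haplogroup_name rest acc found base

def find_downstream_haplogroups (haplogroup_name : String) (haplogroups : List (Int × String)) : List String :=
  fdhA_loop haplogroup_name haplogroups [] false 0

-- ===== PORT B =====
-- next((k for k in ks if levels[k] <= base), dflt)
def fdhB_next (levels : List Int) (base : Int) : List Int → Int → Int
  | [], dflt => dflt
  | k :: ks, dflt => if PySem.List.pyGetD levels k 0 ≤ base then k else fdhB_next levels base ks dflt

def find_downstream_haplogroups_alt (haplogroup_name : String) (haplogroups : List (Int × String)) : List String :=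
  let levels := haplogroups.map (fun p => p.1)
  let names := haplogroups.map (fun p => p.2)
  match PySem.List.index? names haplogroup_name with
  | none => []
  | some i =>
    let base := PySem.List.pyGetD levels (i : Int) 0
    let j := fdhB_next levels base (PySem.List.pyRange ((i : Int) + 1) (PySem.List.len names) 1) (PySem.List.len names)
    PySem.List.slice names (some (i : Int)) (some j)

-- ===== PRECONDITION & SPEC =====
-- Pre_ excludes lists in which the searched name occurs more than once: on a repeated match A
-- re-bases at the duplicate and keeps scanning instead of stopping, an accidental corner of a
-- lookup that is only meaningful for distinct haplogroup names; B slices at the first match.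
def Pre_find_downstream_haplogroups (haplogroup_name : String) (haplogroups : List (Int × String)) : Prop :=
  (haplogroups.map Prod.snd).count haplogroup_name ≤ 1
instance (haplogroup_name : String) (haplogroups : List (Int × String)) : Decidable (Pre_find_downstream_haplogroups haplogroup_name haplogroups) := by unfold Pre_find_downstream_haplogroups; infer_instance

def pvWitness_find_downstream_haplogroups : String × (List (Int × String)) :=
  ("B", [(1, "A"), (2, "B"), (3, "C"), (3, "D"), (2, "E")])

def Spec_find_downstream_haplogroups (haplogroup_name : String) (haplogroups : List (Int × String)) (out : List String) : Prop := out = find_downstream_haplogroups_alt haplogroup_name haplogroups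
instance (haplogroup_name : String) (haplogroups : List (Int × String)) (out : List String) : Decidable (Spec_find_downstream_haplogroups haplogroup_name haplogroups out) := by unfold Spec_find_downstream_haplogroups; infer_instance

-- ===== CLAIM (what is proved, stated in full; the proofs are below) =====
def Claim_equal_find_downstream_haplogroups : Prop := ∀ (haplogroup_name : String) (haplogroups : List (Int × String)), Dom_find_downstream_haplogroups haplogroup_name haplogroups → Pre_find_downstream_haplogroups haplogroup_name haplogroups → Spec_find_downstream_haplogroups haplogroup_name haplogroups (find_downstream_haplogroups haplogroup_name haplogroups)

-- ===== LEMMAS AND PROOFS =====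

-- A's loop before the name is found: a non-matching head is skipped with no state change
theorem fdhA_skip (nm : String) (pre t : List (Int × String)) (acc : List String) (base : Int)
    (h : nm ∉ pre.map Prod.snd) :
    fdhA_loop nm (pre ++ t) acc false base = fdhA_loop nm t acc false base := by
  induction pre generalizing acc with
  | nil => rfl
  | cons p pre ih =>
    simp only [List.map_cons, List.mem_cons] at h
    push_neg at h
    obtain ⟨h1, h2⟩ := h
    cases p with
    | mk lv hg =>
      simp only [List.cons_append, fdhA_loop, if_neg (Ne.symm h1), Bool.false_and,
        Bool.false_eq_true, if_neg, ite_false]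
      exact ih _ h2

-- A's loop once found, when the name does not recur: append while level > base, stop otherwise
theorem fdhA_found (nm : String) (suf : List (Int × String)) (acc : List String) (base : Int)
    (h : nm ∉ suf.map Prod.snd) :
    fdhA_loop nm suf acc true base =
      acc ++ (suf.takeWhile (fun p => decide (base < p.1))).map Prod.snd := by
  induction suf generalizing acc with
  | nil => simp [fdhA_loop]
  | cons p suf ih =>
    simp only [List.map_cons, List.mem_cons] at h
    push_neg at h
    obtain ⟨h1, h2⟩ := h
    cases p with
    | mk lv hg =>
      by_cases hl : base < lv
      · simp only [fdhA_loop, if_neg (Ne.symm h1), Bool.true_and, decide_eq_true hl,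
          if_pos rfl, ih _ h2, List.takeWhile_cons, decide_eq_true hl, List.map_cons]
        simp
      · have hle : lv ≤ base := le_of_not_gt hl
        simp [fdhA_loop, Ne.symm h1, hl, hle]

-- B's next() over range(pre.length, (pre++suf).length): first index whose level ≤ base
theorem fdhB_next_spec (base : Int) (suf pre : List Int) :
    fdhB_next (pre ++ suf) base
        (PySem.List.pyRange (pre.length : Int) ((pre ++ suf).length : Int) 1)
        ((pre ++ suf).length : Int)
      = ((pre.length + (suf.takeWhile (fun l => decide (base < l))).length : Nat) : Int) := by
  induction suf generalizing pre with
  | nil =>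
    have : PySem.List.pyRange (pre.length : Int) ((pre ++ []).length : Int) 1 = [] := by
      simp [PySem.List.pyRange]
    simp [this, fdhB_next]
  | cons l suf ih =>
    have hlt : (pre.length : Int) < ((pre ++ l :: suf).length : Int) := by
      simp only [List.length_append, List.length_cons]
      push_cast
      omega
    rw [PySem.List.pyRange_one_cons hlt]
    simp only [fdhB_next]
    have hget : PySem.List.pyGetD (pre ++ l :: suf) (pre.length : Int) 0 = l := by
      rw [PySem.List.pyGetD_natCast]
      simp
    rw [hget]
    by_cases hl : l ≤ base
    · simp [hl, not_lt.mpr hl]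
    · have h1 : ((pre.length : Int) + 1) = (((pre ++ [l]).length : Nat) : Int) := by simp
      have h2 : (pre ++ l :: suf) = (pre ++ [l]) ++ suf := by simp
      rw [if_neg hl, h1, h2]
      rw [ih (pre ++ [l])]
      have : base < l := lt_of_not_ge hl
      simp [List.takeWhile_cons, this]
      push_cast
      ring

-- maps and takeWhile commute in the way the two results need
theorem take_map_snd (base : Int) (suf : List (Int × String)) :
    (suf.map Prod.snd).take ((suf.map Prod.fst).takeWhile (fun l => decide (base < l))).length
      = (suf.takeWhile (fun p => decide (base < p.1))).map Prod.snd := by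
  induction suf with
  | nil => rfl
  | cons p suf ih =>
    by_cases hl : base < p.1
    · simp [List.takeWhile_cons, hl, ih]
    · simp [hl]

-- ===== VERDICT (by name: the statement is the Claim_ definition above) =====
theorem find_downstream_haplogroups_spec : Claim_equal_find_downstream_haplogroups := by
  intro nm hs _ hpre
  unfold Spec_find_downstream_haplogroups
  unfold find_downstream_haplogroups
  have halt : find_downstream_haplogroups_alt nm hs =
      (match PySem.List.index? (hs.map Prod.snd) nm with
       | none => []
       | some i =>
         PySem.List.slice (hs.map Prod.snd) (some (i : Int))
           (some (fdhB_next (hs.map Prod.fst) (PySem.List.pyGetD (hs.map Prod.fst) (i : Int) 0)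
             (PySem.List.pyRange ((i : Int) + 1) (PySem.List.len (hs.map Prod.snd)) 1)
             (PySem.List.len (hs.map Prod.snd))))) := rfl
  rw [halt]
  cases hidx : PySem.List.index? (hs.map Prod.snd) nm with
  | none =>
    -- name absent: A never sets found and never appends
    have hnot : nm ∉ hs.map Prod.snd := (PySem.List.index?_eq_none_iff (hs.map Prod.snd) nm).mp hidx
    have := fdhA_skip nm hs [] ([] : List String) 0 hnot
    simpa [fdhA_loop] using this
  | some i =>
    obtain ⟨npre, nsuf, hsplit, hlen, hnotpre⟩ :=
      (PySem.List.index?_eq_some_iff (hs.map Prod.snd) nm i).mp hidx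
    rw [List.map_eq_append_iff] at hsplit
    obtain ⟨pre, rest, hhs, hpre', hrest⟩ := hsplit
    rw [List.map_eq_cons_iff] at hrest
    obtain ⟨q, suf, hrest', hq, hsuf⟩ := hrest
    obtain ⟨lv, hg⟩ := q
    simp only at hq
    -- no second occurrence of the name in suf (from Pre_)
    have hnotsuf : nm ∉ suf.map Prod.snd := by
      unfold Pre_find_downstream_haplogroups at hpre
      rw [hhs, hrest'] at hpre
      intro hmem
      have hc := List.count_pos_iff.mpr hmem
      simp [hq] at hpre
      omega
    subst hhs hrest' hpre' hsuf hlen hq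
    -- A's side
    rw [fdhA_skip hg pre ((lv, hg) :: suf) [] 0 hnotpre]
    simp only [fdhA_loop, List.nil_append]
    rw [fdhA_found hg suf [hg] lv hnotsuf]
    -- B's side: the base level
    have hbase : PySem.List.pyGetD ((pre ++ (lv, hg) :: suf).map Prod.fst)
        ((((pre.map Prod.snd).length : Nat) : Int)) 0 = lv := by
      rw [PySem.List.pyGetD_natCast]
      simp
    -- B's side: next() = first index past the match whose level <= lv
    have hdec : (pre ++ (lv, hg) :: suf).map Prod.fst
        = (pre.map Prod.fst ++ [lv]) ++ suf.map Prod.fst := by simp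
    have hnext : fdhB_next ((pre ++ (lv, hg) :: suf).map Prod.fst) lv
        (PySem.List.pyRange ((((pre.map Prod.snd).length : Nat) : Int) + 1)
          (PySem.List.len ((pre ++ (lv, hg) :: suf).map Prod.snd)) 1)
        (PySem.List.len ((pre ++ (lv, hg) :: suf).map Prod.snd))
        = (((pre.length + 1 + ((suf.map Prod.fst).takeWhile (fun l => decide (lv < l))).length : Nat) : Int)) := by
      have h1 : ((((pre.map Prod.snd).length : Nat) : Int) + 1)
          = ((((pre.map Prod.fst ++ [lv]).length : Nat)) : Int) := by
        simp
      have h2 : PySem.List.len ((pre ++ (lv, hg) :: suf).map Prod.snd)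
          = ((((pre.map Prod.fst ++ [lv]) ++ suf.map Prod.fst).length : Nat) : Int) := by
        simp [PySem.List.len_eq]
      rw [hdec, h1, h2, fdhB_next_spec lv (suf.map Prod.fst) (pre.map Prod.fst ++ [lv])]
      simp only [List.length_append, List.length_map, List.length_cons, List.length_nil]
    rw [hbase, hnext, PySem.List.slice_natCast]
    -- slicing the names at [pre.length : pre.length + 1 + t]
    rw [List.map_append, List.map_cons]
    rw [List.drop_append_of_le_length (by simp)]
    simp only [List.drop_length, List.nil_append]
    simp only [List.length_map]
    have harith : pre.length + 1 + ((suf.map Prod.fst).takeWhile (fun l => decide (lv < l))).length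
        - pre.length
        = ((suf.map Prod.fst).takeWhile (fun l => decide (lv < l))).length + 1 := by omega
    rw [harith, List.take_succ_cons, take_map_snd lv suf]
    simp
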